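-- pv_equiv track=rewrite | github.com/Rodeffs/Year2_Programming | Discrete_Math/6_lab/graph.py | check_degrees
-- ===== SOURCE A (Python) =====
-- def check_degrees(graph, n):
--     vertice = 0
--
--     while vertice < n:
--         in_degree = 0
--         out_degree = 0
--
--         for i in range(n):
--             if graph[vertice][i]:
--                 in_degree += 1
--             if graph[i][vertice]:
--                 out_degree += 1
--
--         if in_degree != out_degree or in_degree * out_degree == 0:
--             return False
--
--         vertice += 1
--
--     return True
-- ===== SOURCE B (Python) =====
-- def check_degrees(graph, n):
--     # Flow-balance formulation: sweep every cell once; a truthy edge (i, j)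
--     # adds +1 to vertex i's balance and -1 to vertex j's balance, and marks
--     # vertex i as having an outgoing-row entry.  All degrees are equal and
--     # nonzero iff every balance is 0 and every vertex was marked.
--     balance = [0] * n
--     marked = [False] * n
--     for i in range(n):
--         row = graph[i]
--         for j in range(n):
--             if row[j]:
--                 balance[i] += 1
--                 balance[j] -= 1
--                 marked[i] = True
--     return all(b == 0 for b in balance) and all(marked)
-- ===== Notes on version B (the rewrite author's own statement) =====
-- stated objective: alternative
-- what changed: A computes, vertex by vertex, an in-degree and an out-degree by rescanning that vertex's row and column and returns False early; B never compares two degree counts: it sweeps every matrix cell exactly once, maintaining a per-vertex edge-balance vector (+1 at the row vertex, -1 at the column vertex of each truthy cell) and a marked flag, and accepts iff every balance is zero and every vertex is marked.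
-- outside the precondition, e.g. on check_degrees([[0, 0], [1]], 2): A returns False, B raises IndexError
import Mathlib
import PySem

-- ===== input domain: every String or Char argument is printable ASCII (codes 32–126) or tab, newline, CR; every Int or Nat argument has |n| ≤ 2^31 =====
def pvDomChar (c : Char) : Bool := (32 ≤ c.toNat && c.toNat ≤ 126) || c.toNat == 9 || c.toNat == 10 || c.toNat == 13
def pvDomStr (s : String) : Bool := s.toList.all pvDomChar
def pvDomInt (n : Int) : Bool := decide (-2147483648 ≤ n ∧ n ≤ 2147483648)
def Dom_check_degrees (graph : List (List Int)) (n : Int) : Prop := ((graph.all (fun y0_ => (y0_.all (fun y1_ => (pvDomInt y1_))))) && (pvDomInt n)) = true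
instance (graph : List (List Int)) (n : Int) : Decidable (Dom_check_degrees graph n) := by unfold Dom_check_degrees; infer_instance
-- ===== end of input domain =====

-- B replaces A's per-vertex row-and-column degree comparison (with early return) by a single
-- sweep over all cells maintaining an edge-balance vector and a marked flag (objective: alternative algorithm).

-- ===== PORT A =====
def pvDegs (graph : List (List Int)) (n vertice : Int) : Int × Int :=
  (PySem.List.pyRange 0 n 1).foldl
    (fun (p : Int × Int) i =>
      let p1 := if PySem.List.pyGetD (PySem.List.pyGetD graph vertice []) i 0 ≠ 0 then (p.1 + 1, p.2) else p
      if PySem.List.pyGetD (PySem.List.pyGetD graph i []) vertice 0 ≠ 0 then (p1.1, p1.2 + 1) else p1)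
    ((0 : Int), (0 : Int))
-- the 'while vertice < n' loop
def pvChkLoop (graph : List (List Int)) (n vertice : Int) : Bool :=
  if h : vertice < n then
    let degs := pvDegs graph n vertice
    if degs.1 ≠ degs.2 ∨ degs.1 * degs.2 = 0 then false
    else pvChkLoop graph n (vertice + 1)
  else true
termination_by (n - vertice).toNat
decreasing_by omega

def check_degrees (graph : List (List Int)) (n : Int) : Bool := pvChkLoop graph n 0

-- ===== PORT B =====
-- one step of the cell sweep: 'if row[j]: balance[i] += 1; balance[j] -= 1; marked[i] = True'
def pvStep (row : List Int) (i : Int) (st : List Int × List Bool) (j : Int) : List Int × List Bool :=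
  if PySem.List.pyGetD row j 0 ≠ 0 then
    ((st.1.modify i.toNat (· + 1)).modify j.toNat (· - 1), st.2.set i.toNat true)
  else st

def check_degrees_alt (graph : List (List Int)) (n : Int) : Bool :=
  let st := (PySem.List.pyRange 0 n 1).foldl
    (fun (st : List Int × List Bool) i =>
      (PySem.List.pyRange 0 n 1).foldl (pvStep (PySem.List.pyGetD graph i []) i) st)
    (List.replicate n.toNat 0, List.replicate n.toNat false)
  st.1.all (fun b => b == 0) && st.2.all (fun s => s)

-- ===== PRECONDITION & SPEC =====
-- Pre_ requires a well-formed n x n prefix (n <= len(graph), first n rows of length >= n): outside it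
-- Python A raises IndexError mid-scan unless an early False fires first, and Python B raises IndexError too.
def Pre_check_degrees (graph : List (List Int)) (n : Int) : Prop :=
  n ≤ (graph.length : Int) ∧ ∀ row ∈ graph.take n.toNat, n ≤ (row.length : Int)
instance (graph : List (List Int)) (n : Int) : Decidable (Pre_check_degrees graph n) := by unfold Pre_check_degrees; infer_instance

def pvWitness_check_degrees : List (List Int) × Int := ([[0, 1], [1, 0]], 2)

def Spec_check_degrees (graph : List (List Int)) (n : Int) (out : Bool) : Prop := out = check_degrees_alt graph n
instance (graph : List (List Int)) (n : Int) (out : Bool) : Decidable (Spec_check_degrees graph n out) := by unfold Spec_check_degrees; infer_instance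

-- ===== CLAIM (what is proved, stated in full; the proofs are below) =====
def Claim_equal_check_degrees : Prop := ∀ (graph : List (List Int)) (n : Int), Dom_check_degrees graph n → Pre_check_degrees graph n → Spec_check_degrees graph n (check_degrees graph n)

-- ===== LEMMAS AND PROOFS =====

-- canonical cell/row/column data shared by both characterisations
def pvTr (graph : List (List Int)) (i j : Nat) : Bool := decide ((graph.getD i []).getD j 0 ≠ 0)
def pvRc (graph : List (List Int)) (m v : Nat) : Nat := (List.range m).countP (fun j => pvTr graph v j)
def pvCc (graph : List (List Int)) (m v : Nat) : Nat := (List.range m).countP (fun i => pvTr graph i v)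

lemma pvFold_pair_count (p q : Int → Prop) [DecidablePred p] [DecidablePred q] :
    ∀ (js : List Int) (a b : Int),
      js.foldl (fun (st : Int × Int) i =>
          let s1 := if p i then (st.1 + 1, st.2) else st
          if q i then (s1.1, s1.2 + 1) else s1) (a, b)
        = (a + js.countP (fun i => decide (p i)), b + js.countP (fun i => decide (q i))) := by
  intro js
  induction js with
  | nil => simp
  | cons j rest ih =>
    intro a b
    simp only [List.foldl_cons, List.countP_cons]
    by_cases hp : p j <;> by_cases hq : q j <;>
      simp [hp, hq, ih, Prod.ext_iff] <;> omega


lemma pvRangeNat (n : Int) : PySem.List.pyRange 0 n 1 = (List.range n.toNat).map (fun (k : Nat) => (k : Int)) := by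
  by_cases h : 0 ≤ n
  · obtain ⟨m, rfl⟩ := Int.eq_ofNat_of_zero_le h
    simpa using PySem.List.pyRange_zero_natCast m
  · rw [PySem.List.pyRange_one_eq_nil (by omega)]
    simp [show n.toNat = 0 by omega]


lemma pvDegs_eq (graph : List (List Int)) (n v : Int) (hv : 0 ≤ v) :
    pvDegs graph n v = ((pvRc graph n.toNat v.toNat : Int), (pvCc graph n.toNat v.toNat : Int)) := by
  unfold pvDegs
  rw [pvFold_pair_count (fun i => PySem.List.pyGetD (PySem.List.pyGetD graph v []) i 0 ≠ 0)
      (fun i => PySem.List.pyGetD (PySem.List.pyGetD graph i []) v 0 ≠ 0), pvRangeNat]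
  rw [List.countP_map, List.countP_map]
  rw [Prod.ext_iff]
  constructor
  · rw [pvRc]
    simp only [zero_add]
    congr 1
    apply List.countP_congr
    intro k _
    simp [Function.comp, PySem.List.pyGetD_natCast, PySem.List.pyGetD_of_nonneg _ _ hv, pvTr]
  · rw [pvCc]
    simp only [zero_add]
    congr 1
    apply List.countP_congr
    intro k _
    simp [Function.comp, PySem.List.pyGetD_natCast, PySem.List.pyGetD_of_nonneg _ _ hv, pvTr]

lemma pvChkLoop_iff (graph : List (List Int)) (n : Int) :
    ∀ (k : Nat) (v : Int), (n - v).toNat = k →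
      (pvChkLoop graph n v = true ↔
        ∀ w : Int, v ≤ w → w < n →
          (pvDegs graph n w).1 = (pvDegs graph n w).2 ∧ (pvDegs graph n w).1 * (pvDegs graph n w).2 ≠ 0) := by
  intro k
  induction k with
  | zero =>
    intro v hk
    rw [pvChkLoop]
    have hnv : ¬ v < n := by omega
    simp only [hnv, dite_false]
    constructor
    · intro _ w hw1 hw2; omega
    · intro _; trivial
  | succ k ih =>
    intro v hk
    rw [pvChkLoop]
    have hnv : v < n := by omega
    simp only [hnv, dite_true]
    by_cases hc : (pvDegs graph n v).1 ≠ (pvDegs graph n v).2 ∨ (pvDegs graph n v).1 * (pvDegs graph n v).2 = 0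
    · simp only [hc, if_true]
      constructor
      · intro h; exact absurd h (by simp)
      · intro hall
        have := hall v le_rfl hnv
        exact absurd hc (by tauto)
    · simp only [hc, if_false]
      rw [ih (v + 1) (by omega)]
      constructor
      · intro hall w hw1 hw2
        rcases eq_or_lt_of_le hw1 with rfl | hlt
        · push_neg at hc; exact hc
        · exact hall w (by omega) hw2
      · intro hall w hw1 hw2
        exact hall w (by omega) hw2

lemma check_degrees_true_iff (graph : List (List Int)) (n : Int) :
    (check_degrees graph n = true ↔
      ∀ v : Nat, v < n.toNat →
        pvRc graph n.toNat v = pvCc graph n.toNat v ∧ pvRc graph n.toNat v ≠ 0) := by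
  rw [check_degrees, pvChkLoop_iff graph n (n - 0).toNat 0 rfl]
  constructor
  · intro hall v hv
    have h := hall (v : Int) (by omega) (by omega)
    rw [pvDegs_eq graph n v (by omega)] at h
    simp only [Int.toNat_natCast] at h
    obtain ⟨h1, h2⟩ := h
    constructor
    · exact_mod_cast h1
    · intro h0
      apply h2
      rw [h0] at h1 ⊢
      simp [← h1]
  · intro hall w hw1 hw2
    have h := hall w.toNat (by omega)
    rw [pvDegs_eq graph n w hw1]
    dsimp only
    obtain ⟨h1, h2⟩ := h
    refine ⟨by exact_mod_cast h1, ?_⟩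
    intro hmul
    rcases mul_eq_zero.mp hmul with h0 | h0 <;>
      [skip; rw [← h1] at h0] <;> exact h2 (by exact_mod_cast h0)

lemma pvStep_natCast (row : List Int) (i j : Nat) (st : List Int × List Bool) :
    pvStep row (i : Int) st (j : Int)
      = if row.getD j 0 ≠ 0 then ((st.1.modify i (· + 1)).modify j (· - 1), st.2.set i true) else st := by
  simp [pvStep]

lemma pvGetD_modify (l : List Int) (k : Nat) (f : Int → Int) (hk : k < l.length) (v : Nat) :
    (l.modify k f).getD v 0 = if v = k then f (l.getD v 0) else l.getD v 0 := by
  rcases eq_or_ne v k with rfl | h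
  · simp [List.getD_eq_getElem?_getD, List.getElem?_modify, List.getElem?_eq_getElem hk]
  · simp [List.getD_eq_getElem?_getD, List.getElem?_modify, h, Ne.symm h]

lemma pvGetD_set (l : List Bool) (k : Nat) (hk : k < l.length) (v : Nat) :
    (l.set k true).getD v false = if v = k then true else l.getD v false := by
  rcases eq_or_ne v k with rfl | h
  · simp [List.getD_eq_getElem?_getD, List.getElem?_set, hk]
  · simp [List.getD_eq_getElem?_getD, List.getElem?_set, h, Ne.symm h]

lemma pvInner_char (row : List Int) (i : Nat) :
    ∀ (js : List Nat) (d : List Int) (z : List Bool), i < d.length → i < z.length →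
      (∀ j ∈ js, j < d.length) →
      (js.foldl (fun st (j : Nat) => pvStep row (i : Int) st (j : Int)) (d, z)).1.length = d.length ∧
      (js.foldl (fun st (j : Nat) => pvStep row (i : Int) st (j : Int)) (d, z)).2.length = z.length ∧
      (∀ v : Nat,
        (js.foldl (fun st (j : Nat) => pvStep row (i : Int) st (j : Int)) (d, z)).1.getD v 0
          = d.getD v 0 + (if v = i then (js.countP (fun j => row.getD j 0 ≠ 0) : Int) else 0)
              - (js.countP (fun j => j == v && decide (row.getD j 0 ≠ 0)) : Int)) ∧
      (∀ v : Nat,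
        (js.foldl (fun st (j : Nat) => pvStep row (i : Int) st (j : Int)) (d, z)).2.getD v false
          = (z.getD v false || (v == i && js.any (fun j => row.getD j 0 ≠ 0)))) := by
  intro js
  induction js with
  | nil => intro d z hi hiz _; simp
  | cons j js ih =>
    intro d z hi hiz hb
    have hj : j < d.length := hb j (List.mem_cons_self)
    rw [List.foldl_cons, pvStep_natCast]
    by_cases hc : row.getD j 0 ≠ 0
    · rw [if_pos hc]
      have hcj : (decide (row.getD j 0 ≠ 0)) = true := by simpa using hc
      have hi' : i < ((d.modify i (· + 1)).modify j (· - 1)).length := by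
        simpa using hi
      have hiz' : i < (z.set i true).length := by simpa using hiz
      have hb' : ∀ j' ∈ js, j' < ((d.modify i (· + 1)).modify j (· - 1)).length := by
        intro j' hj'; simpa using hb j' (List.mem_cons_of_mem _ hj')
      obtain ⟨h1, h2, h3, h4⟩ := ih ((d.modify i (· + 1)).modify j (· - 1)) (z.set i true) hi' hiz' hb'
      refine ⟨by simpa using h1, by simpa using h2, ?_, ?_⟩
      · intro v
        rw [h3 v, pvGetD_modify _ j _ (by simpa using hj) v, pvGetD_modify _ i _ hi v,
            List.countP_cons, List.countP_cons, hcj]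
        rcases eq_or_ne j v with hjv | hjv
        · have hd : (j == v) = true := by simp [hjv]
          have hvj : v = j := hjv.symm
          by_cases hvi : v = i <;> simp [hvi, hvj] <;> (try split_ifs) <;> omega
        · have hd : (j == v) = false := by simp [hjv]
          have hvj : v ≠ j := fun h => hjv h.symm
          by_cases hvi : v = i <;> simp [hvi, hd] <;> (try split_ifs) <;> omega
      · intro v
        rw [h4 v, pvGetD_set _ i hiz v, List.any_cons, hcj]
        by_cases hvi : v = i
        · simp [hvi]
        · have hb2 : (v == i) = false := beq_eq_false_iff_ne.mpr hvi
          simp [hvi, hb2]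
    · rw [if_neg hc]
      push_neg at hc
      have hcj : (decide (row.getD j 0 ≠ 0)) = false := by simpa using hc
      obtain ⟨h1, h2, h3, h4⟩ := ih d z hi hiz (fun j' hj' => hb j' (List.mem_cons_of_mem _ hj'))
      refine ⟨h1, h2, ?_, ?_⟩
      · intro v
        rw [h3 v, List.countP_cons, List.countP_cons, hcj]
        simp
      · intro v
        rw [h4 v, List.any_cons, hcj]
        simp
lemma pvCountP_eq_single (p : Nat → Bool) (v : Nat) :
    ∀ (l : List Nat), l.countP (fun j => j == v && p j) = if p v then l.count v else 0 := by
  intro l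
  induction l with
  | nil => simp
  | cons a l ih => by_cases h : a = v <;> by_cases hp : p v <;> simp [List.count_cons, h, hp, ih]

lemma pvOuter_char (graph : List (List Int)) (m : Nat) :
    ∀ (is' : List Nat) (d : List Int) (z : List Bool), d.length = m → z.length = m →
      (∀ i ∈ is', i < m) →
      (is'.foldl (fun st (i : Nat) => (List.range m).foldl
          (fun st2 (j : Nat) => pvStep (graph.getD i []) (i : Int) st2 (j : Int)) st) (d, z)).1.length = m ∧
      (is'.foldl (fun st (i : Nat) => (List.range m).foldl
          (fun st2 (j : Nat) => pvStep (graph.getD i []) (i : Int) st2 (j : Int)) st) (d, z)).2.length = m ∧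
      (∀ v : Nat, v < m →
        (is'.foldl (fun st (i : Nat) => (List.range m).foldl
            (fun st2 (j : Nat) => pvStep (graph.getD i []) (i : Int) st2 (j : Int)) st) (d, z)).1.getD v 0
          = d.getD v 0 + (is'.count v : Int) * (pvRc graph m v : Int)
              - (is'.countP (fun i => pvTr graph i v) : Int)) ∧
      (∀ v : Nat, v < m →
        (is'.foldl (fun st (i : Nat) => (List.range m).foldl
            (fun st2 (j : Nat) => pvStep (graph.getD i []) (i : Int) st2 (j : Int)) st) (d, z)).2.getD v false
          = (z.getD v false || (decide (v ∈ is') && decide (0 < pvRc graph m v)))) := by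
  intro is'
  induction is' with
  | nil => intro d z hd hz _; simp [hd, hz]
  | cons i is ih =>
    intro d z hd hz hb
    have him : i < m := hb i (List.mem_cons_self)
    simp only [List.foldl_cons]
    obtain ⟨g1, g2, g3, g4⟩ :=
      pvInner_char (graph.getD i []) i (List.range m) d z (by omega) (by omega)
        (by intro j hj; rw [hd]; exact List.mem_range.mp hj)
    set st' := (List.range m).foldl
        (fun st2 (j : Nat) => pvStep (graph.getD i []) (i : Int) st2 (j : Int)) (d, z) with hst'
    obtain ⟨h1, h2, h3, h4⟩ := ih st'.1 st'.2 (by rw [g1, hd]) (by rw [g2, hz])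
      (fun i' hi' => hb i' (List.mem_cons_of_mem _ hi'))
    rw [Prod.mk.eta] at h1 h2 h3 h4
    refine ⟨h1, h2, ?_, ?_⟩
    · intro v hv
      rw [h3 v hv, g3 v, pvCountP_eq_single, List.count_cons, List.countP_cons, List.count_range]
      simp only [pvRc, pvTr, hv, if_true, beq_iff_eq]
      by_cases hvi : v = i
      · subst hvi
        split_ifs <;> first
          | (exfalso; omega)
          | (push_cast; ring_nf)
      · split_ifs <;> first
          | (exfalso; omega)
          | (push_cast; ring_nf)
    · intro v hv
      rw [h4 v hv, g4 v]
      have hany : ((List.range m).any (fun j => decide ((graph.getD i []).getD j 0 ≠ 0)))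
          = decide (0 < pvRc graph m i) := by
        rw [Bool.eq_iff_iff]
        simp [List.any_eq_true, pvRc, List.countP_pos_iff, pvTr]
      rw [hany]
      by_cases hvi : v = i
      · simp [hvi]
        tauto
      · have hb2 : (v == i) = false := beq_eq_false_iff_ne.mpr hvi
        simp [hb2, hvi, List.mem_cons]
lemma pvAllInt_iff (l : List Int) :
    (l.all (fun b => b == 0) = true) ↔ ∀ v, v < l.length → l.getD v 0 = 0 := by
  rw [List.all_eq_true]
  constructor
  · intro h v hv
    have := h l[v] (l.getElem_mem hv)
    simpa [List.getD_eq_getElem?_getD, List.getElem?_eq_getElem hv] using this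
  · intro h x hx
    obtain ⟨v, hv, rfl⟩ := List.mem_iff_getElem.mp hx
    have := h v hv
    simpa [List.getD_eq_getElem?_getD, List.getElem?_eq_getElem hv] using this

lemma pvAllBool_iff (l : List Bool) :
    (l.all (fun s => s) = true) ↔ ∀ v, v < l.length → l.getD v false = true := by
  rw [List.all_eq_true]
  constructor
  · intro h v hv
    have := h l[v] (l.getElem_mem hv)
    simpa [List.getD_eq_getElem?_getD, List.getElem?_eq_getElem hv] using this
  · intro h x hx
    obtain ⟨v, hv, rfl⟩ := List.mem_iff_getElem.mp hx
    have := h v hv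
    simpa [List.getD_eq_getElem?_getD, List.getElem?_eq_getElem hv] using this

lemma check_degrees_alt_true_iff (graph : List (List Int)) (n : Int) :
    (check_degrees_alt graph n = true ↔
      ∀ v : Nat, v < n.toNat →
        pvRc graph n.toNat v = pvCc graph n.toNat v ∧ pvRc graph n.toNat v ≠ 0) := by
  unfold check_degrees_alt
  simp only [pvRangeNat, List.foldl_map, PySem.List.pyGetD_natCast]
  obtain ⟨h1, h2, h3, h4⟩ := pvOuter_char graph n.toNat (List.range n.toNat)
      (List.replicate n.toNat 0) (List.replicate n.toNat false)
      (by simp) (by simp) (by intro i hi; exact List.mem_range.mp hi)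
  rw [Bool.and_eq_true, pvAllInt_iff, pvAllBool_iff, h1, h2]
  constructor
  · rintro ⟨ha, hb⟩ v hv
    have hva := ha v hv
    have hvb := hb v hv
    rw [h3 v hv] at hva
    rw [h4 v hv] at hvb
    simp [List.count_range, hv, List.mem_range] at hva hvb
    refine ⟨?_, by omega⟩
    have hcast : (pvRc graph n.toNat v : Int) = ((List.range n.toNat).countP (fun i => pvTr graph i v) : Int) := by omega
    have := (Int.natCast_inj).mp hcast
    simpa [pvCc] using this
  · intro h
    constructor
    · intro v hv
      rw [h3 v hv]
      obtain ⟨hrc, hnz⟩ := h v hv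
      have hcc : pvCc graph n.toNat v = (List.range n.toNat).countP (fun i => pvTr graph i v) := rfl
      simp only [List.getD_replicate, List.count_range, hv, if_true]
      rw [← hcc, ← hrc]
      push_cast
      ring
    · intro v hv
      rw [h4 v hv]
      obtain ⟨hrc, hnz⟩ := h v hv
      simp [List.mem_range, hv]
      omega

-- ===== VERDICT (by name: the statement is the Claim_ definition above) =====
theorem check_degrees_spec : Claim_equal_check_degrees := by
  intro graph n _ _
  unfold Spec_check_degrees
  rw [Bool.eq_iff_iff, check_degrees_true_iff, check_degrees_alt_true_iff]
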